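-- pv_equiv track=rewrite | github.com/YouhuaLi/math_misc | srg_solver/srg_verify.py | gen_sage_code
-- ===== SOURCE A (Python) =====
-- def gen_sage_code(v, edges):
--     l = []
--     row = 0
--     column = 1
--     for e in edges:
--       if int(e) > 0:
--           l.append((row,column))
--       column += 1
--       if column == v:
--           row += 1
--           column = row + 1
--     s = "G = Graph(%s)\n" % str(l)
--     s += "G.is_strongly_regular()\n"
--     s += "#G.plot()"
--     return s
-- ===== SOURCE B (Python) =====
-- def gen_sage_code(v, edges):
--     # Decode each flat slot index into its (row, column) coordinate of the
--     # upper-triangle layout: a row pointer advances past full rows on demand,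
--     # and the column is the offset of the index inside the current row.
--     pairs = []
--     row, base = 0, 0  # current row and the flat index of its first slot
--     for j in [i for i, e in enumerate(edges) if int(e) > 0]:
--         while row < v - 1 and base + (v - 1 - row) <= j:
--             base += v - 1 - row
--             row += 1
--         pairs.append((row, row + 1 + j - base))
--     s = "G = Graph(%s)\n" % str(pairs)
--     s += "G.is_strongly_regular()\n"
--     s += "#G.plot()"
--     return s
-- ===== Notes on version B (the rewrite author's own statement) =====
-- stated objective: alternative
-- what changed: B first collects the indices of positive edges, then decodes each flat index into its (row, column) coordinate with a lazily advancing row pointer (base index of the current row), instead of A's per-edge row/column counter mutation interleaved with the filter.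
import Mathlib
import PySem

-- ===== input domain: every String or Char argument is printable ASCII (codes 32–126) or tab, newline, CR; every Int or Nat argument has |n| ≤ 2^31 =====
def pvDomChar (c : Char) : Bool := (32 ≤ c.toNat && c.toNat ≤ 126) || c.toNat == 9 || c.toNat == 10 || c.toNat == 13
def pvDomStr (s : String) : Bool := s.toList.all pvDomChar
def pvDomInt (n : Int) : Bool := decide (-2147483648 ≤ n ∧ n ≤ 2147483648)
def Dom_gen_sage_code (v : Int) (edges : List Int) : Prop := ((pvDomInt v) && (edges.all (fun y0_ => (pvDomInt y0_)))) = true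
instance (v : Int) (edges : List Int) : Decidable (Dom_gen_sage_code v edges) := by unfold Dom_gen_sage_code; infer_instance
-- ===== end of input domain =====

-- B collects the positive edge indices first and decodes each flat index into its
-- (row, column) coordinate with a lazily advancing row pointer, instead of A's
-- per-edge row/column counter mutation; same return value on every input
-- (alternative decomposition, same cost).


-- ===== PORT A =====
-- Python str() of an (int, int) tuple and of a list of such tuples ("[(0, 1), (1, 2)]")
def pvReprPair (p : Int × Int) : String := "(" ++ PySem.Int.toStr p.1 ++ ", " ++ PySem.Int.toStr p.2 ++ ")"
def pvReprPairsAux : List (Int × Int) → String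
  | [] => ""
  | [p] => pvReprPair p
  | p :: q :: rest => pvReprPair p ++ ", " ++ pvReprPairsAux (q :: rest)
def pvReprPairList (l : List (Int × Int)) : String := "[" ++ pvReprPairsAux l ++ "]"

-- the body of A's 'for e in edges' loop, on the state (l, row, column)
def pvStepA (v : Int) (s : List (Int × Int) × Int × Int) (e : Int) : List (Int × Int) × Int × Int :=
  let l := if 0 < e then s.1 ++ [(s.2.1, s.2.2)] else s.1
  let column := s.2.2 + 1
  if column = v then (l, s.2.1 + 1, s.2.1 + 1 + 1) else (l, s.2.1, column)

def gen_sage_code (v : Int) (edges : List Int) : String :=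
  let st := edges.foldl (pvStepA v) ([], 0, 1)
  "G = Graph(" ++ pvReprPairList st.1 ++ ")\n" ++ "G.is_strongly_regular()\n" ++ "#G.plot()"

-- ===== PORT B =====
-- the comprehension [i for i, e in enumerate(edges) if int(e) > 0]
def pvIdxs (edges : List Int) : List Int :=
  ((PySem.List.enumerate edges).filter (fun ie => decide (0 < ie.2))).map (fun ie => ie.1)

-- B's 'while row < v - 1 and base + (v - 1 - row) <= j' loop, on the state (row, base)
def pvAdv (v : Int) (row base j : Int) : Int × Int :=
  if _h : row < v - 1 ∧ base + (v - 1 - row) ≤ j then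
    pvAdv v (row + 1) (base + (v - 1 - row)) j
  else (row, base)
termination_by (v - 1 - row).toNat
decreasing_by omega

-- the body of B's 'for j in …' loop, on the state (pairs, row, base)
def pvStepB (v : Int) (s : List (Int × Int) × Int × Int) (j : Int) : List (Int × Int) × Int × Int :=
  let rb := pvAdv v s.2.1 s.2.2 j
  (s.1 ++ [(rb.1, rb.1 + 1 + j - rb.2)], rb.1, rb.2)

def gen_sage_code_alt (v : Int) (edges : List Int) : String :=
  let st := (pvIdxs edges).foldl (pvStepB v) ([], 0, 0)
  "G = Graph(" ++ pvReprPairList st.1 ++ ")\n" ++ "G.is_strongly_regular()\n" ++ "#G.plot()"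

-- ===== PRECONDITION & SPEC =====
def Spec_gen_sage_code (v : Int) (edges : List Int) (out : String) : Prop := out = gen_sage_code_alt v edges
instance (v : Int) (edges : List Int) (out : String) : Decidable (Spec_gen_sage_code v edges out) := by unfold Spec_gen_sage_code; infer_instance

-- ===== CLAIM (what is proved, stated in full; the proofs are below) =====
def Claim_equal_gen_sage_code : Prop := ∀ (v : Int) (edges : List Int), Dom_gen_sage_code v edges → Spec_gen_sage_code v edges (gen_sage_code v edges)

-- ===== LEMMAS AND PROOFS =====

-- the pairs A's loop appends from state (row, column), as a standalone recursion
def pvRunA (v : Int) : List Int → Int → Int → List (Int × Int)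
  | [], _, _ => []
  | e :: es, r, c =>
    (if 0 < e then [(r, c)] else []) ++
      (if c + 1 = v then pvRunA v es (r + 1) (r + 1 + 1) else pvRunA v es r (c + 1))

theorem pvFoldlA (v : Int) (es : List Int) (acc : List (Int × Int)) (r c : Int) :
    (es.foldl (pvStepA v) (acc, r, c)).1 = acc ++ pvRunA v es r c := by
  induction es generalizing acc r c with
  | nil => simp [pvRunA]
  | cons e es ih =>
      simp only [List.foldl_cons, pvStepA, pvRunA]
      by_cases he : 0 < e <;> by_cases hc : c + 1 = v <;>
        simp [he, hc, ih, List.append_assoc]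

-- pvAdv stops exactly when the guard fails
theorem pvAdv_stop (v row base j : Int) :
    ¬ ((pvAdv v row base j).1 < v - 1 ∧ (pvAdv v row base j).2 + (v - 1 - (pvAdv v row base j).1) ≤ j) := by
  induction row, base using pvAdv.induct v j with
  | case1 row base h ih => rw [pvAdv, dif_pos h]; exact ih
  | case2 row base h => rw [pvAdv, dif_neg h]; exact h

-- advancing for j, then for j + 1, is advancing for j + 1
theorem pvAdv_succ (v row base j : Int) :
    pvAdv v (pvAdv v row base j).1 (pvAdv v row base j).2 (j + 1) = pvAdv v row base (j + 1) := by
  induction row, base using pvAdv.induct v j with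
  | case1 row base h ih =>
      have h1 : pvAdv v row base j = pvAdv v (row + 1) (base + (v - 1 - row)) j := by
        rw [pvAdv]; exact dif_pos h
      have h2 : pvAdv v row base (j + 1) = pvAdv v (row + 1) (base + (v - 1 - row)) (j + 1) := by
        rw [pvAdv]; exact dif_pos ⟨h.1, by omega⟩
      rw [h1, h2, ih]
  | case2 row base h =>
      have h1 : pvAdv v row base j = (row, base) := by rw [pvAdv]; exact dif_neg h
      rw [h1]

-- the invariant tying A's walk state (r, c) at index j to B's pointer state (row, base)
def pvInv (v j r c row base : Int) : Prop :=
  (pvAdv v row base j).1 = r ∧ c = r + 1 + j - (pvAdv v row base j).2 ∧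
    0 ≤ (pvAdv v row base j).2 ∧ (pvAdv v row base j).2 ≤ j

-- stepping A's walk preserves the invariant (B's pointer state untouched)
theorem pvInv_step (v j r c row base : Int) (h : pvInv v j r c row base) :
    pvInv v (j + 1) (if c + 1 = v then r + 1 else r) (if c + 1 = v then r + 1 + 1 else c + 1) row base := by
  obtain ⟨hr, hc, hb0, hbj⟩ := h
  have hstop := pvAdv_stop v row base j
  unfold pvInv
  rw [← pvAdv_succ v row base j]
  set rb := pvAdv v row base j with hrb
  by_cases hcv : c + 1 = v
  · -- the row is full: B's pointer advances exactly once
    have h1 : rb.1 < v - 1 := by omega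
    have h2 : rb.2 + (v - 1 - rb.1) = j + 1 := by omega
    rw [show pvAdv v rb.1 rb.2 (j + 1) = pvAdv v (rb.1 + 1) (rb.2 + (v - 1 - rb.1)) (j + 1) from by
      rw [pvAdv, dif_pos ⟨h1, by omega⟩]]
    rw [show pvAdv v (rb.1 + 1) (rb.2 + (v - 1 - rb.1)) (j + 1) = (rb.1 + 1, rb.2 + (v - 1 - rb.1)) from by
      rw [pvAdv, dif_neg (by omega)]]
    simp only [hcv, if_pos]
    refine ⟨by omega, by omega, by omega, by omega⟩
  · -- still inside the row: B's pointer does not move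
    have h3 : ¬ (rb.1 < v - 1 ∧ rb.2 + (v - 1 - rb.1) ≤ j + 1) := by
      rintro ⟨ha, hb⟩
      have := hstop
      omega
    rw [show pvAdv v rb.1 rb.2 (j + 1) = (rb.1, rb.2) from by rw [pvAdv, dif_neg h3]]
    simp only [hcv, if_false]
    exact ⟨by omega, by omega, by omega, by omega⟩

-- B's fold over the positive indices of the remaining edges produces A's walk output
theorem pvMain (v : Int) (es : List Int) : ∀ (j r c row base : Int) (acc : List (Int × Int)),
    pvInv v j r c row base →
    ((((PySem.List.enumerate es j).filter (fun ie => decide (0 < ie.2))).map (fun ie => ie.1)).foldl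
        (pvStepB v) (acc, row, base)).1 = acc ++ pvRunA v es r c := by
  induction es with
  | nil => intro j r c row base acc _; simp [pvRunA]
  | cons e es ih =>
      intro j r c row base acc hinv
      obtain ⟨hr, hc, hb0, hbj⟩ := hinv
      rw [PySem.List.enumerate_cons]
      have hstep := pvInv_step v j r c row base ⟨hr, hc, hb0, hbj⟩
      by_cases he : 0 < e
      · have hemit : pvStepB v (acc, row, base) j =
            (acc ++ [(r, c)], (pvAdv v row base j).1, (pvAdv v row base j).2) := by
          simp only [pvStepB, hr]
          rw [hc]
        have hinv' : pvInv v (j + 1) (if c + 1 = v then r + 1 else r)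
            (if c + 1 = v then r + 1 + 1 else c + 1) (pvAdv v row base j).1 (pvAdv v row base j).2 := by
          unfold pvInv at hstep ⊢
          rw [pvAdv_succ v row base j]
          exact hstep
        by_cases hcv : c + 1 = v <;>
          simp [he, hcv, pvRunA, hemit,
            ih (j + 1) _ _ _ _ (acc ++ [(r, c)]) (by simpa [hcv] using hinv'), List.append_assoc]
      · by_cases hcv : c + 1 = v <;>
          simp [he, hcv, pvRunA,
            ih (j + 1) _ _ _ _ acc (by simpa [hcv] using hstep)]

-- ===== VERDICT (by name: the statement is the Claim_ definition above) =====
theorem gen_sage_code_spec : Claim_equal_gen_sage_code := by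
  intro v edges _
  show gen_sage_code v edges = gen_sage_code_alt v edges
  have hA : (edges.foldl (pvStepA v) ([], 0, 1)).1 = pvRunA v edges 0 1 := by
    rw [pvFoldlA v edges [] 0 1, List.nil_append]
  have hinv0 : pvInv v 0 0 1 0 0 := by
    have : pvAdv v 0 0 0 = (0, 0) := by rw [pvAdv, dif_neg (by omega)]
    unfold pvInv
    rw [this]
    exact ⟨rfl, by omega, by omega, by omega⟩
  have hB := pvMain v edges 0 0 1 0 0 [] hinv0
  simp only [List.nil_append] at hB
  simp only [gen_sage_code, gen_sage_code_alt, hA, pvIdxs, hB]
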